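-- pv_equiv track=rewrite | github.com/Abdulrahaman-A-Musa/hausa-audio-transcriber | hausa_wav_only.py | parse_transcription_infer_q_and_a
-- ===== SOURCE A (Python) =====
-- def parse_transcription_infer_q_and_a(transcript_text):
--     """
--     Infer questions and answers from the transcription text based on Hausa question words.
--     """
--     question_words = ["wa", "me", "ina", "yaya", "wane", "wace", "nawa", "ta yaya"]  # Common Hausa question words
--     qa_pairs = []
--     lines = transcript_text.split('. ')  # Split by sentences
--
--     current_question = None
--     for line in lines:
--         if any(line.strip().lower().startswith(word) for word in question_words):
--             # Treat this line as a question
--             if current_question: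
--                 # If there's an unanswered question, append it with an empty response
--                 qa_pairs.append({"Question": current_question, "Response": ""})
--             current_question = line.strip()
--         elif current_question:
--             # Treat this line as an answer to the current question
--             qa_pairs.append({"Question": current_question, "Response": line.strip()})
--             current_question = None
--
--     # If there's a leftover question without an answer
--     if current_question:
--         qa_pairs.append({"Question": current_question, "Response": ""})
--
--     return qa_pairs
-- ===== SOURCE B (Python) =====
-- def parse_transcription_infer_q_and_a(transcript_text):
--     question_words = ["wa", "me", "ina", "yaya", "wane", "wace", "nawa", "ta yaya"]
--
--     def is_question(line):
--         s = line.strip().lower()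
--         return any(s.startswith(w) for w in question_words)
--
--     lines = transcript_text.split('. ')
--     qa_pairs = []
--     i = 0
--     n = len(lines)
--     while i < n:
--         if is_question(lines[i]):
--             if i + 1 < n and not is_question(lines[i + 1]):
--                 qa_pairs.append({"Question": lines[i].strip(),
--                                  "Response": lines[i + 1].strip()})
--                 i += 2
--             else:
--                 qa_pairs.append({"Question": lines[i].strip(), "Response": ""})
--                 i += 1
--         else:
--             i += 1
--     return qa_pairs
-- ===== Notes on version B (the rewrite author's own statement) =====
-- stated objective: alternative
-- what changed: Replaces A's single pass carrying a current_question state variable (with a final flush) by a stateless index loop with one-step lookahead that decides each pair locally and advances by 1 or 2.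
import Mathlib
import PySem

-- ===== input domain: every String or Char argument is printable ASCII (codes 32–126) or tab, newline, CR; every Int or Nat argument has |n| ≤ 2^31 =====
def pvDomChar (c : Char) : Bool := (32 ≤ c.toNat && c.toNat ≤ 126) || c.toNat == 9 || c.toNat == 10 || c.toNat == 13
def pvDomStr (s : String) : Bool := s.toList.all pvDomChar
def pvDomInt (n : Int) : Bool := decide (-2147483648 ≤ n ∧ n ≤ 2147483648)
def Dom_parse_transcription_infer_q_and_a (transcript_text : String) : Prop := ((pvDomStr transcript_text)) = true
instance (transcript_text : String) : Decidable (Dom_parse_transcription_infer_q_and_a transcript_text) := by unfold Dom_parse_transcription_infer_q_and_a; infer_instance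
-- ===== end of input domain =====

-- B replaces A's carried `current_question` state variable by an index loop with one-step
-- lookahead (alternative decomposition, same cost); return value only, no side effects.

-- shared vocabulary and classification test (identical expression in both Pythons)
def pvQuestionWords : List String := ["wa", "me", "ina", "yaya", "wane", "wace", "nawa", "ta yaya"]

def pvIsQuestion (line : String) : Bool :=
  pvQuestionWords.any (fun w => PySem.Str.startswith (PySem.Str.lower (PySem.Str.strip line)) w)

-- ===== PORT A =====
-- A's for-loop over lines carrying (qa_pairs, current_question); `if current_question:` is
-- ported as an Option match — the state is only ever `some q` with q a stripped line that
-- starts with a (nonempty) question word, hence never the falsy "".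
def pvStepA (st : List (List (String × String)) × Option String) (line : String) :
    List (List (String × String)) × Option String :=
  let (qa, cur) := st
  if pvIsQuestion line then
    match cur with
    | some q => (qa ++ [[("Question", q), ("Response", "")]], some (PySem.Str.strip line))
    | none => (qa, some (PySem.Str.strip line))
  else
    match cur with
    | some q => (qa ++ [[("Question", q), ("Response", PySem.Str.strip line)]], none)
    | none => (qa, none)

-- t.split('. '): sep ≠ "" so PySem.Str.split? never returns none; the .getD default is unreachable
def pvSplitDot (t : String) : List String := (PySem.Str.split? t ". ").getD []

def parse_transcription_infer_q_and_a (transcript_text : String) : List (List (String × String)) :=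
  let lines := pvSplitDot transcript_text
  let res : List (List (String × String)) × Option String := lines.foldl pvStepA ([], none)
  match res.2 with
  | some q => res.1 ++ [[("Question", q), ("Response", "")]]
  | none => res.1

-- ===== PORT B =====
-- B's `while i < n` index loop with one-step lookahead, as recursion on the list of lines
-- (i → the remaining suffix; `i+1 < n and not is_question(lines[i+1])` → the two-element pattern).
def pvGoB : List String → List (List (String × String))
  | [] => []
  | [l] =>
    if pvIsQuestion l then [[("Question", PySem.Str.strip l), ("Response", "")]] else []
  | l1 :: l2 :: rest =>
    if pvIsQuestion l1 then
      if pvIsQuestion l2 then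
        [("Question", PySem.Str.strip l1), ("Response", "")] :: pvGoB (l2 :: rest)
      else
        [("Question", PySem.Str.strip l1), ("Response", PySem.Str.strip l2)] :: pvGoB rest
    else
      pvGoB (l2 :: rest)

def parse_transcription_infer_q_and_a_alt (transcript_text : String) : List (List (String × String)) :=
  pvGoB (pvSplitDot transcript_text)

-- ===== PRECONDITION & SPEC =====
def Spec_parse_transcription_infer_q_and_a (transcript_text : String) (out : List (List (String × String))) : Prop := out = parse_transcription_infer_q_and_a_alt transcript_text
instance (transcript_text : String) (out : List (List (String × String))) : Decidable (Spec_parse_transcription_infer_q_and_a transcript_text out) := by unfold Spec_parse_transcription_infer_q_and_a; infer_instance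

-- ===== CLAIM (what is proved, stated in full; the proofs are below) =====
def Claim_equal_parse_transcription_infer_q_and_a : Prop := ∀ (transcript_text : String), Dom_parse_transcription_infer_q_and_a transcript_text → Spec_parse_transcription_infer_q_and_a transcript_text (parse_transcription_infer_q_and_a transcript_text)

-- ===== LEMMAS AND PROOFS =====

-- recursive characterisation of A's loop-with-pending-question (proof helper)
def pvAuxA : Option String → List String → List (List (String × String))
  | none, [] => []
  | some q, [] => [[("Question", q), ("Response", "")]]
  | none, l :: r =>
    if pvIsQuestion l then pvAuxA (some (PySem.Str.strip l)) r else pvAuxA none r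
  | some q, l :: r =>
    if pvIsQuestion l then [("Question", q), ("Response", "")] :: pvAuxA (some (PySem.Str.strip l)) r
    else [("Question", q), ("Response", PySem.Str.strip l)] :: pvAuxA none r

-- A's foldl + final flush equals acc ++ pvAuxA cur ls
lemma pvFoldA_eq (ls : List String) : ∀ (acc : List (List (String × String))) (cur : Option String),
    (match (ls.foldl pvStepA (acc, cur)).2 with
     | some q => (ls.foldl pvStepA (acc, cur)).1 ++ [[("Question", q), ("Response", "")]]
     | none => (ls.foldl pvStepA (acc, cur)).1) = acc ++ pvAuxA cur ls := by
  induction ls with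
  | nil => intro acc cur; cases cur <;> simp [pvAuxA]
  | cons l r ih =>
    intro acc cur
    simp only [List.foldl_cons]
    by_cases hq : pvIsQuestion l
    · cases cur with
      | none => simp [pvStepA, hq, pvAuxA, ih]
      | some q => simp [pvStepA, hq, pvAuxA, ih]
    · cases cur with
      | none => simp [pvStepA, hq, pvAuxA, ih]
      | some q => simp [pvStepA, hq, pvAuxA, ih]

-- A's pending-question states coincide with B's lookahead recursion
lemma pvAuxA_eq_goB : ∀ (n : ℕ) (ls : List String), ls.length ≤ n →
    pvAuxA none ls = pvGoB ls ∧
    ∀ l, pvIsQuestion l = true → pvAuxA (some (PySem.Str.strip l)) ls = pvGoB (l :: ls) := by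
  intro n
  induction n with
  | zero =>
    intro ls hls
    have hnil : ls = [] := by cases ls <;> simp_all
    subst hnil
    refine ⟨rfl, fun l hl => ?_⟩
    show _ = if pvIsQuestion l = true then _ else _
    rw [if_pos hl]; simp only [pvAuxA]
  | succ n ih =>
    intro ls hls
    cases ls with
    | nil =>
      refine ⟨rfl, fun l hl => ?_⟩
      show _ = if pvIsQuestion l = true then _ else _
      rw [if_pos hl]; simp only [pvAuxA]
    | cons l2 r =>
      have hr : r.length ≤ n := by simpa using hls
      have eNone : pvAuxA none (l2 :: r)
          = if pvIsQuestion l2 = true then pvAuxA (some (PySem.Str.strip l2)) r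
            else pvAuxA none r := by simp only [pvAuxA]
      constructor
      · by_cases h2 : pvIsQuestion l2 = true
        · rw [eNone, if_pos h2]
          exact (ih r hr).2 l2 h2
        · rw [eNone, if_neg h2]
          cases r with
          | nil =>
            have e1 : pvGoB [l2]
                = if pvIsQuestion l2 = true then
                    [[("Question", PySem.Str.strip l2), ("Response", "")]] else [] := by
              simp only [pvGoB]
            rw [e1, if_neg h2]; rfl
          | cons l3 r3 =>
            have eG : pvGoB (l2 :: l3 :: r3)
                = if pvIsQuestion l2 = true then
                    (if pvIsQuestion l3 = true then
                      [("Question", PySem.Str.strip l2), ("Response", "")] :: pvGoB (l3 :: r3)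
                    else
                      [("Question", PySem.Str.strip l2), ("Response", PySem.Str.strip l3)] :: pvGoB r3)
                  else pvGoB (l3 :: r3) := by simp only [pvGoB]
            rw [eG, if_neg h2]
            exact (ih (l3 :: r3) hr).1
      · intro l hl
        have eSome : pvAuxA (some (PySem.Str.strip l)) (l2 :: r)
            = if pvIsQuestion l2 = true then
                [("Question", PySem.Str.strip l), ("Response", "")]
                  :: pvAuxA (some (PySem.Str.strip l2)) r
              else
                [("Question", PySem.Str.strip l), ("Response", PySem.Str.strip l2)]
                  :: pvAuxA none r := by simp only [pvAuxA]
        have eG : pvGoB (l :: l2 :: r)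
            = if pvIsQuestion l = true then
                (if pvIsQuestion l2 = true then
                  [("Question", PySem.Str.strip l), ("Response", "")] :: pvGoB (l2 :: r)
                else
                  [("Question", PySem.Str.strip l), ("Response", PySem.Str.strip l2)] :: pvGoB r)
              else pvGoB (l2 :: r) := by cases r <;> simp only [pvGoB]
        rw [eSome, eG, if_pos hl]
        by_cases h2 : pvIsQuestion l2 = true
        · rw [if_pos h2, if_pos h2]
          exact congrArg _ ((ih r hr).2 l2 h2)
        · rw [if_neg h2, if_neg h2]
          exact congrArg _ (ih r hr).1

-- ===== VERDICT (by name: the statement is the Claim_ definition above) =====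
theorem parse_transcription_infer_q_and_a_spec : Claim_equal_parse_transcription_infer_q_and_a := by
  intro t _
  unfold Spec_parse_transcription_infer_q_and_a parse_transcription_infer_q_and_a
    parse_transcription_infer_q_and_a_alt
  have h := pvFoldA_eq (pvSplitDot t) [] none
  simp only [List.nil_append] at h
  rw [h]
  exact (pvAuxA_eq_goB (pvSplitDot t).length _ le_rfl).1
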